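-- pv_equiv track=rewrite | github.com/skeaneRW/adventOfCode | 2023/day9/part1.py | createSequences
-- ===== SOURCE A (Python) =====
-- def createSequences(input):
--     def createSequence(line):
--         result = [line]
--
--         def isComplete(arr):
--             noZeros = [char for char in arr if char != 0]
--             return(len(noZeros) == 0)
--         currentLine = line
--
--         while not isComplete(result[len(result) - 1]):
--             newLine = []
--             for index, num in enumerate(currentLine):
--                 if index > 0:
--                     newLine.append(num - currentLine[index - 1])
--             result.append(newLine)
--             currentLine = newLine
--         return result
--
--     sequences = []
--     for line in input:
--         sequences.append(createSequence(line))
--     return sequences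
-- ===== SOURCE B (Python) =====
-- def createSequences(input):
--     def makeSeq(row):
--         if all(x == 0 for x in row):
--             return [row]
--         diffs = [b - a for a, b in zip(row, row[1:])]
--         return [row] + makeSeq(diffs)
--     return [makeSeq(line) for line in input]
-- ===== Notes on version B (the rewrite author's own statement) =====
-- stated objective: simpler
-- what changed: The imperative while-loop with an enumerate/index-arithmetic difference pass and a mutated result list is replaced by a recursive makeSeq helper that tests all-zero directly and computes the difference row with zip(row, row[1:]), mapped over the input lines.
import Mathlib
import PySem

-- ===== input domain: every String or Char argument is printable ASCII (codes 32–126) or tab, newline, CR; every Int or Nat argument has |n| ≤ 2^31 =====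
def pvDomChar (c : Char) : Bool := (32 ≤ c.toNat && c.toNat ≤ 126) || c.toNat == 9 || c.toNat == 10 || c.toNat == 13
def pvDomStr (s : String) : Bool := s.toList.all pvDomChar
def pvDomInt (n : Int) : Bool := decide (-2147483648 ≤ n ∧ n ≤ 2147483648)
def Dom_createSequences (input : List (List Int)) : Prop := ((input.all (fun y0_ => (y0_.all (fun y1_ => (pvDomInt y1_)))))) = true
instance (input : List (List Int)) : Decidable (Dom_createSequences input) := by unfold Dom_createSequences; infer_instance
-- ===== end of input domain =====

-- B replaces A's imperative while-loop (enumerate + index arithmetic into the previous row, mutated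
-- result list) by a recursive makeSeq helper using zip(row, row[1:]) differences, mapped over the lines.

-- ===== PORT A =====
-- isComplete: noZeros = [char for char in arr if char != 0]; return len(noZeros) == 0
def pvIsComplete (arr : List Int) : Bool :=
  (arr.filter (fun c => c != 0)).length == 0

-- the inner for-loop building newLine from enumerate(currentLine);
-- currentLine[index-1] is taken with pyGet?; index ≥ 1 there, so the .getD 0 default is never reached
def pvDiffsA (cur : List Int) : List Int :=
  (PySem.List.enumerate cur).foldl
    (fun nl pr => if pr.1 > 0 then nl ++ [pr.2 - (PySem.List.pyGet? cur (pr.1 - 1)).getD 0] else nl)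
    []

-- The next three lemmas are needed by pvLoopA's decreasing_by (termination of A's while loop):
-- the difference row is what zipWith computes, hence one element shorter.
theorem pvDiffsA_filter_enumerate (xs : List Int) : ∀ (s : Int), 1 ≤ s →
    (PySem.List.enumerate xs s).filter (fun pr => decide (pr.1 > 0)) = PySem.List.enumerate xs s := by
  induction xs with
  | nil => intro s _; rfl
  | cons y ys ih =>
      intro s hs
      rw [PySem.List.enumerate_cons]
      simp [show (0 : Int) < s by omega, ih (s + 1) (by omega)]

theorem pvDiffsA_go (cur : List Int) : ∀ (rest : List Int) (k : Nat) (prev : Int), 1 ≤ k →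
    cur[k - 1]? = some prev → cur.drop k = rest →
    (PySem.List.enumerate rest (k : Int)).map
      (fun pr => pr.2 - (PySem.List.pyGet? cur (pr.1 - 1)).getD 0)
      = List.zipWith (fun a b => b - a) (prev :: rest) rest := by
  intro rest
  induction rest with
  | nil => intro k prev _ _ _; rfl
  | cons y rest' ih =>
      intro k prev hk hprev hdrop
      rw [PySem.List.enumerate_cons, List.map_cons]
      have hidx : ((k : Int) - 1) = ((k - 1 : Nat) : Int) := by omega
      have hget : PySem.List.pyGet? cur ((k : Int) - 1) = some prev := by
        rw [hidx, PySem.List.pyGet?_natCast, hprev]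
      have hcurk : cur[k]? = some y := by
        have := List.getElem?_drop (xs := cur) (i := k) (j := 0)
        rw [hdrop] at this
        simpa using this.symm
      have hdrop' : cur.drop (k + 1) = rest' := by
        have : List.drop 1 (List.drop k cur) = List.drop (k + 1) cur := List.drop_drop
        rw [hdrop] at this
        simpa using this.symm
      have hk1 : ((k : Int) + 1) = ((k + 1 : Nat) : Int) := by omega
      have hrec := ih (k + 1) y (by omega) (by simpa using hcurk) hdrop'
      rw [hget, hk1, hrec]
      simp [List.zipWith]

theorem pvDiffsA_eq (cur : List Int) :
    pvDiffsA cur = List.zipWith (fun a b => b - a) cur cur.tail := by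
  cases cur with
  | nil => rfl
  | cons x xs =>
      unfold pvDiffsA
      have hfun : (fun (nl : List Int) (pr : Int × Int) =>
          if pr.1 > 0 then nl ++ [pr.2 - (PySem.List.pyGet? (x :: xs) (pr.1 - 1)).getD 0] else nl)
          = (fun nl pr => if (fun (q : Int × Int) => decide (q.1 > 0)) pr = true
              then nl ++ [(fun (q : Int × Int) => q.2 - (PySem.List.pyGet? (x :: xs) (q.1 - 1)).getD 0) pr] else nl) := by
        funext nl pr; simp
      rw [hfun, PySem.List.foldl_append_if, PySem.List.enumerate_cons, List.filter_cons]
      simp only [zero_add, List.nil_append]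
      rw [if_neg (by simp), pvDiffsA_filter_enumerate xs 1 le_rfl]
      have := pvDiffsA_go (x :: xs) xs 1 x le_rfl (by simp) (by simp)
      simpa using this

-- while not isComplete(result[len(result)-1]): … — result[-1] is always currentLine (loop
-- invariant of A), so the loop is carried on the pair (currentLine, result)
def pvLoopA (cur : List Int) (res : List (List Int)) : List (List Int) :=
  if h : pvIsComplete cur then res
  else
    let newLine := pvDiffsA cur
    pvLoopA newLine (res ++ [newLine])
termination_by cur.length
decreasing_by
  have hne : cur ≠ [] := by
    intro hnil; subst hnil; exact h rfl
  rw [pvDiffsA_eq]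
  cases cur with
  | nil => exact absurd rfl hne
  | cons x xs => simp

def pvCreateSequence (line : List Int) : List (List Int) :=
  pvLoopA line [line]

def createSequences (input : List (List Int)) : List (List (List Int)) :=
  input.foldl (fun seqs line => seqs ++ [pvCreateSequence line]) []

-- ===== PORT B =====
-- makeSeq(row): [row] if all zero, else [row] + makeSeq([b - a for a, b in zip(row, row[1:])])
def pvMakeSeq (row : List Int) : List (List Int) :=
  if h : row.all (fun x => x == 0) then [row]
  else row :: pvMakeSeq (List.zipWith (fun a b => b - a) row (PySem.List.slice row (some 1)))
termination_by row.length
decreasing_by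
  have hne : row ≠ [] := by
    intro hnil; subst hnil; exact h rfl
  rw [PySem.List.slice_from row (a := 1) (by norm_num)]
  cases row with
  | nil => exact absurd rfl hne
  | cons x xs => simp

def createSequences_alt (input : List (List Int)) : List (List (List Int)) :=
  input.map pvMakeSeq

-- ===== PRECONDITION & SPEC =====
def Spec_createSequences (input : List (List Int)) (out : List (List (List Int))) : Prop := out = createSequences_alt input
instance (input : List (List Int)) (out : List (List (List Int))) : Decidable (Spec_createSequences input out) := by unfold Spec_createSequences; infer_instance

-- ===== CLAIM (what is proved, stated in full; the proofs are below) =====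
def Claim_equal_createSequences : Prop := ∀ (input : List (List Int)), Dom_createSequences input → Spec_createSequences input (createSequences input)

-- ===== LEMMAS AND PROOFS =====
-- A's completion test (no nonzero entries left) is B's all-zero test
theorem pvIsComplete_eq (arr : List Int) :
    pvIsComplete arr = arr.all (fun x => x == 0) := by
  induction arr with
  | nil => rfl
  | cons a l ih =>
      by_cases hA : a = 0
      · subst hA; simpa [pvIsComplete, List.all_cons] using ih
      · simp [pvIsComplete, List.all_cons, hA]

theorem pvMakeSeq_cons (row : List Int) :
    pvMakeSeq row = row :: (pvMakeSeq row).tail := by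
  rw [pvMakeSeq.eq_def]
  split <;> simp

theorem pvLoopA_eq (cur : List Int) (res : List (List Int)) :
    pvLoopA cur res = res ++ (pvMakeSeq cur).tail := by
  fun_induction pvLoopA cur res with
  | case1 cur res h =>
      rw [pvMakeSeq.eq_def, dif_pos (by rw [← pvIsComplete_eq]; exact h)]
      simp
  | case2 cur res h nl ih =>
      rw [ih]
      have hslice : PySem.List.slice cur (some 1) = cur.tail := by
        rw [PySem.List.slice_from cur (a := 1) (by norm_num)]; simp
      conv_rhs => rw [pvMakeSeq.eq_def]
      rw [dif_neg (by rw [← pvIsComplete_eq]; exact h), hslice, ← pvDiffsA_eq,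
        pvMakeSeq_cons (pvDiffsA cur)]
      simp
      rfl

theorem pvCreateSequence_eq (line : List Int) :
    pvCreateSequence line = pvMakeSeq line := by
  unfold pvCreateSequence
  rw [pvLoopA_eq]
  conv_rhs => rw [pvMakeSeq_cons line]
  rfl

-- ===== VERDICT (by name: the statement is the Claim_ definition above) =====
theorem createSequences_spec : Claim_equal_createSequences := by
  intro input _
  unfold Spec_createSequences createSequences createSequences_alt
  rw [PySem.List.foldl_append_singleton_eq_map, funext pvCreateSequence_eq]
  rfl
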